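-- pv_equiv track=rewrite | github.com/sirobhushanamsreenath/Programming-Challenges | MustDoInterviewprep/accordian.py | accordian
-- ===== SOURCE A (Python) =====
-- def accordian(l):
--     prevdiff = abs(l[0] - l[1])
--     diff = abs(l[1] - l[2])
--     increase, decrease = 0, 0
--     if diff > prevdiff:
--         increase, decrease = 1, 0
--     elif diff < prevdiff:
--         increase, decrease = 0, 1
--     else:
--         return False
--     for i in range(2, len(l) - 1):
--         prevdiff = diff
--         diff = abs(l[i] - l[i + 1])
--         if diff > prevdiff and decrease == 1:
--             increase, decrease = 1, 0
--         elif diff < prevdiff and increase == 1: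
--             increase, decrease = 0, 1
--         else:
--             return False
--     return True
-- ===== SOURCE B (Python) =====
-- def accordian(l):
--     # Two-pass table version: diff array, then sign array, then alternation check.
--     d = [abs(l[i] - l[i + 1]) for i in range(len(l) - 1)]
--     s = [(d[i + 1] > d[i]) - (d[i + 1] < d[i]) for i in range(len(d) - 1)]
--     if 0 in s:
--         return False
--     return all(s[i] != s[i + 1] for i in range(len(s) - 1))
-- ===== Notes on version B (the rewrite author's own statement) =====
-- stated objective: alternative
-- what changed: B materialises the whole difference array and then a sign table in two comprehension passes and checks 'no zero sign, no equal adjacent signs', instead of A's single pass threading an increase/decrease two-flag state machine with early returns.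
import Mathlib
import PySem

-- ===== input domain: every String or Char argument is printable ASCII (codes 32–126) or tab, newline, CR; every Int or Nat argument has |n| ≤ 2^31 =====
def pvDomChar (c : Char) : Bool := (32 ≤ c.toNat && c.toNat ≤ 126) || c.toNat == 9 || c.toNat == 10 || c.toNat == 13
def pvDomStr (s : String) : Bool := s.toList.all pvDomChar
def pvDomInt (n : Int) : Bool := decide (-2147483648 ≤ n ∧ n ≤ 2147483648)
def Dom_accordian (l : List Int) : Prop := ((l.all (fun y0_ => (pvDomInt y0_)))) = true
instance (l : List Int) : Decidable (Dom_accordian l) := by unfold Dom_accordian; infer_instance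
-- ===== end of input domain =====

-- B replaces A's one-pass increase/decrease state machine by two materialised tables
-- (difference array, then sign array) checked for "no zero, no repeated adjacent sign";
-- objective: alternative decomposition, same O(n) cost.

-- ===== PORT A =====
-- one loop iteration of A's for-loop; state none = "already returned False"
def pvStepA (l : List Int) (st : Option (Int × Int × Int)) (i : Int) : Option (Int × Int × Int) :=
  match st with
  | none => none
  | some (diff0, increase, decrease) =>
    let prevdiff := diff0
    let diff := |PySem.List.pyGetD l i 0 - PySem.List.pyGetD l (i + 1) 0|
    if diff > prevdiff ∧ decrease = 1 then some (diff, 1, 0)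
    else if diff < prevdiff ∧ increase = 1 then some (diff, 0, 1)
    else none

def accordian (l : List Int) : Bool :=
  -- Pre_accordian (3 ≤ l.length) keeps every index access in range (Python raises IndexError below 3)
  let prevdiff := |PySem.List.pyGetD l 0 0 - PySem.List.pyGetD l 1 0|
  let diff := |PySem.List.pyGetD l 1 0 - PySem.List.pyGetD l 2 0|
  let init : Option (Int × Int × Int) :=
    if diff > prevdiff then some (diff, 1, 0)
    else if diff < prevdiff then some (diff, 0, 1)
    else none
  match init with
  | none => false
  | some st => ((PySem.List.pyRange 2 ((l.length : Int) - 1) 1).foldl (pvStepA l) (some st)).isSome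

-- ===== PORT B =====
def accordian_alt (l : List Int) : Bool :=
  let d := (PySem.List.pyRange 0 ((l.length : Int) - 1) 1).map
    (fun i => |PySem.List.pyGetD l i 0 - PySem.List.pyGetD l (i + 1) 0|)
  let s := (PySem.List.pyRange 0 ((d.length : Int) - 1) 1).map
    (fun i => (if PySem.List.pyGetD d (i + 1) 0 > PySem.List.pyGetD d i 0 then (1 : Int) else 0)
            - (if PySem.List.pyGetD d (i + 1) 0 < PySem.List.pyGetD d i 0 then (1 : Int) else 0))
  if s.contains 0 then false
  else (PySem.List.pyRange 0 ((s.length : Int) - 1) 1).all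
    (fun i => PySem.List.pyGetD s i 0 != PySem.List.pyGetD s (i + 1) 0)

-- ===== PRECONDITION & SPEC =====
-- Pre_ excludes lists shorter than 3, on which A raises IndexError.
def Pre_accordian (l : List Int) : Prop := 3 ≤ l.length
instance (l : List Int) : Decidable (Pre_accordian l) := by unfold Pre_accordian; infer_instance
def pvWitness_accordian : List Int := [1, 2, 4]


def Spec_accordian (l : List Int) (out : Bool) : Prop := out = accordian_alt l
instance (l : List Int) (out : Bool) : Decidable (Spec_accordian l out) := by unfold Spec_accordian; infer_instance

-- ===== CLAIM (what is proved, stated in full; the proofs are below) =====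
def Claim_equal_accordian : Prop := ∀ (l : List Int), Dom_accordian l → Pre_accordian l → Spec_accordian l (accordian l)

-- ===== LEMMAS AND PROOFS =====

-- the j-th absolute difference and its comparison sign, as pure index functions
def pvD (l : List Int) (j : Nat) : Int := |l.getD j 0 - l.getD (j + 1) 0|
def pvS (l : List Int) (j : Nat) : Int :=
  (if pvD l (j + 1) > pvD l j then (1 : Int) else 0) - (if pvD l (j + 1) < pvD l j then (1 : Int) else 0)

lemma pvS_eq_one (l : List Int) (j : Nat) : pvS l j = 1 ↔ pvD l (j + 1) > pvD l j := by
  unfold pvS; split_ifs <;> omega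

lemma pvS_eq_neg_one (l : List Int) (j : Nat) : pvS l j = -1 ↔ pvD l (j + 1) < pvD l j := by
  unfold pvS; split_ifs <;> omega

lemma pvS_cases (l : List Int) (j : Nat) : pvS l j = 1 ∨ pvS l j = -1 ∨ pvS l j = 0 := by
  unfold pvS; split_ifs <;> omega

lemma pvFoldl_none (l : List Int) (r : List Int) : r.foldl (pvStepA l) none = none := by
  induction r with
  | nil => rfl
  | cons x xs ih => simpa [pvStepA] using ih

-- loop invariant for A's for-loop, starting at index p+2 with state from sign p
lemma pvLoopA (l : List Int) (m : Nat) : ∀ (p : Nat), pvS l p ≠ 0 →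
    ((PySem.List.pyRange ((p : Int) + 2) ((p : Int) + 2 + (m : Int)) 1).foldl (pvStepA l)
      (some (pvD l (p + 1), if pvS l p = 1 then 1 else 0, if pvS l p = -1 then 1 else 0))).isSome
  = (List.range m).all (fun k => decide (pvS l (p + 1 + k) ≠ 0) && decide (pvS l (p + 1 + k) ≠ pvS l (p + k))) := by
  induction m with
  | zero =>
    intro p hp
    rw [PySem.List.pyRange_one_eq_nil (by push_cast; omega)]
    simp
  | succ m ih =>
    intro p hp
    rw [PySem.List.pyRange_one_cons (by push_cast; omega)]
    simp only [List.foldl_cons]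
    have hidx1 : ((p : Int) + 2) = ((p + 2 : Nat) : Int) := by push_cast; ring
    have hidx2 : ((p : Int) + 2 + 1) = ((p + 3 : Nat) : Int) := by push_cast; ring
    have hdiff : |PySem.List.pyGetD l ((p : Int) + 2) 0 - PySem.List.pyGetD l ((p : Int) + 2 + 1) 0|
        = pvD l (p + 2) := by
      rw [hidx1, show ((p + 2 : Nat) : Int) + 1 = ((p + 3 : Nat) : Int) from by push_cast; ring,
        PySem.List.pyGetD_natCast, PySem.List.pyGetD_natCast]
      unfold pvD; norm_num
    have hbound : (p : Int) + 2 + ((m + 1 : Nat) : Int) = ((p + 1 : Nat) : Int) + 2 + (m : Int) := by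
      push_cast; ring
    have hstart : (p : Int) + 2 + 1 = ((p + 1 : Nat) : Int) + 2 := by push_cast; ring
    rw [List.range_succ_eq_map, List.all_cons, List.all_map]
    have htail : ((fun k => decide (pvS l (p + 1 + k) ≠ 0) && decide (pvS l (p + 1 + k) ≠ pvS l (p + k))) ∘ Nat.succ)
        = (fun k => decide (pvS l (p + 1 + 1 + k) ≠ 0) && decide (pvS l (p + 1 + 1 + k) ≠ pvS l (p + 1 + k))) := by
      funext k
      simp only [Function.comp_apply]
      rw [show p + 1 + Nat.succ k = p + 1 + 1 + k from by omega,
          show p + Nat.succ k = p + 1 + k from by omega]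
    rw [htail]
    rcases pvS_cases l p with h0 | h0 | h0
    · rcases pvS_cases l (p + 1) with h1 | h1 | h1
      · -- pvS p = 1, pvS (p+1) = 1 : A's step fails, and the head check fails too
        have hgt : pvD l (p + 2) > pvD l (p + 1) := (pvS_eq_one l (p + 1)).mp h1
        simp only [pvStepA, hdiff]
        rw [if_neg (by rw [h0]; norm_num : ¬(pvD l (p + 2) > pvD l (p + 1) ∧ (if pvS l p = -1 then (1:Int) else 0) = 1)),
            if_neg (by intro hc; exact absurd hc.1 (by omega) : ¬(pvD l (p + 2) < pvD l (p + 1) ∧ (if pvS l p = 1 then (1:Int) else 0) = 1)),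
            pvFoldl_none]
        simp [h0, h1]
      · -- pvS p = 1, pvS (p+1) = -1 : step succeeds
        have hlt : pvD l (p + 2) < pvD l (p + 1) := (pvS_eq_neg_one l (p + 1)).mp h1
        simp only [pvStepA, hdiff]
        rw [if_neg (by rw [h0]; norm_num : ¬(pvD l (p + 2) > pvD l (p + 1) ∧ (if pvS l p = -1 then (1:Int) else 0) = 1)),
            if_pos (⟨hlt, by rw [h0]; norm_num⟩ : pvD l (p + 2) < pvD l (p + 1) ∧ (if pvS l p = 1 then (1:Int) else 0) = 1)]
        have hst : (pvD l (p + 2), (0 : Int), (1 : Int))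
            = (pvD l (p + 1 + 1), if pvS l (p + 1) = 1 then (1 : Int) else 0,
               if pvS l (p + 1) = -1 then (1 : Int) else 0) := by
          rw [h1]; norm_num
        rw [hstart, hbound, hst, ih (p + 1) (by omega)]
        simp [h1, h0]
      · -- pvS (p+1) = 0 : equal diffs, step fails, head check fails
        have hng : ¬ pvD l (p + 2) > pvD l (p + 1) := by
          intro hc; exact absurd ((pvS_eq_one l (p + 1)).mpr hc) (by omega)
        have hnl : ¬ pvD l (p + 2) < pvD l (p + 1) := by
          intro hc; exact absurd ((pvS_eq_neg_one l (p + 1)).mpr hc) (by omega)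
        simp only [pvStepA, hdiff]
        rw [if_neg (fun hc => hng hc.1), if_neg (fun hc => hnl hc.1), pvFoldl_none]
        simp [h1]
    · rcases pvS_cases l (p + 1) with h1 | h1 | h1
      · -- pvS p = -1, pvS (p+1) = 1 : step succeeds
        have hgt : pvD l (p + 2) > pvD l (p + 1) := (pvS_eq_one l (p + 1)).mp h1
        simp only [pvStepA, hdiff]
        rw [if_pos (⟨hgt, by rw [h0]; norm_num⟩ : pvD l (p + 2) > pvD l (p + 1) ∧ (if pvS l p = -1 then (1:Int) else 0) = 1)]
        have hst : (pvD l (p + 2), (1 : Int), (0 : Int))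
            = (pvD l (p + 1 + 1), if pvS l (p + 1) = 1 then (1 : Int) else 0,
               if pvS l (p + 1) = -1 then (1 : Int) else 0) := by
          rw [h1]; norm_num
        rw [hstart, hbound, hst, ih (p + 1) (by omega)]
        simp [h1, h0]
      · -- pvS p = -1, pvS (p+1) = -1 : step fails, head check fails
        have hlt : pvD l (p + 2) < pvD l (p + 1) := (pvS_eq_neg_one l (p + 1)).mp h1
        simp only [pvStepA, hdiff]
        rw [if_neg (by intro hc; exact absurd hc.1 (by omega) : ¬(pvD l (p + 2) > pvD l (p + 1) ∧ (if pvS l p = -1 then (1:Int) else 0) = 1)),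
            if_neg (by rw [h0]; norm_num : ¬(pvD l (p + 2) < pvD l (p + 1) ∧ (if pvS l p = 1 then (1:Int) else 0) = 1)),
            pvFoldl_none]
        simp [h0, h1]
      · -- pvS (p+1) = 0 : equal diffs, step fails, head check fails
        have hng : ¬ pvD l (p + 2) > pvD l (p + 1) := by
          intro hc; exact absurd ((pvS_eq_one l (p + 1)).mpr hc) (by omega)
        have hnl : ¬ pvD l (p + 2) < pvD l (p + 1) := by
          intro hc; exact absurd ((pvS_eq_neg_one l (p + 1)).mpr hc) (by omega)
        simp only [pvStepA, hdiff]
        rw [if_neg (fun hc => hng hc.1), if_neg (fun hc => hnl hc.1), pvFoldl_none]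
        simp [h1]
    · exact absurd h0 hp

-- characterisation of A for lists of length ≥ 3
lemma pvAchar (l : List Int) (h : 3 ≤ l.length) :
    accordian l = (decide (pvS l 0 ≠ 0)
      && (List.range (l.length - 3)).all (fun k => decide (pvS l (1 + k) ≠ 0) && decide (pvS l (1 + k) ≠ pvS l k))) := by
  have hd0 : |PySem.List.pyGetD l 0 0 - PySem.List.pyGetD l 1 0| = pvD l 0 := by
    rw [PySem.List.pyGetD_ofNat', PySem.List.pyGetD_ofNat']; unfold pvD; norm_num
  have hd1 : |PySem.List.pyGetD l 1 0 - PySem.List.pyGetD l 2 0| = pvD l 1 := by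
    rw [PySem.List.pyGetD_ofNat', PySem.List.pyGetD_ofNat']; unfold pvD; norm_num
  have hr : PySem.List.pyRange 2 ((l.length : Int) - 1) 1
      = PySem.List.pyRange (((0 : Nat) : Int) + 2) (((0 : Nat) : Int) + 2 + ((l.length - 3 : Nat) : Int)) 1 := by
    congr 1 <;> omega
  rcases pvS_cases l 0 with h0 | h0 | h0
  · have hgt : pvD l 1 > pvD l 0 := (pvS_eq_one l 0).mp h0
    simp only [accordian, hd0, hd1]
    rw [if_pos hgt, hr]
    have hst : (pvD l 1, (1 : Int), (0 : Int))
        = (pvD l (0 + 1), if pvS l 0 = 1 then (1 : Int) else 0, if pvS l 0 = -1 then (1 : Int) else 0) := by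
      rw [h0]; norm_num
    rw [hst]
    dsimp only
    rw [pvLoopA l (l.length - 3) 0 (by omega)]
    simp [h0]
  · have hlt : pvD l 1 < pvD l 0 := (pvS_eq_neg_one l 0).mp h0
    simp only [accordian, hd0, hd1]
    rw [if_neg (by omega : ¬ pvD l 1 > pvD l 0), if_pos hlt, hr]
    have hst : (pvD l 1, (0 : Int), (1 : Int))
        = (pvD l (0 + 1), if pvS l 0 = 1 then (1 : Int) else 0, if pvS l 0 = -1 then (1 : Int) else 0) := by
      rw [h0]; norm_num
    rw [hst]
    dsimp only
    rw [pvLoopA l (l.length - 3) 0 (by omega)]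
    simp [h0]
  · have hng : ¬ pvD l 1 > pvD l 0 := by
      intro hc; exact absurd ((pvS_eq_one l 0).mpr hc) (by omega)
    have hnl : ¬ pvD l 1 < pvD l 0 := by
      intro hc; exact absurd ((pvS_eq_neg_one l 0).mpr hc) (by omega)
    simp only [accordian, hd0, hd1]
    rw [if_neg hng, if_neg hnl]
    simp [h0]

-- characterisation of B for lists of length ≥ 3
lemma pvBchar (l : List Int) (h : 3 ≤ l.length) :
    accordian_alt l = ((List.range (l.length - 2)).all (fun j => decide (pvS l j ≠ 0))
      && (List.range (l.length - 3)).all (fun k => decide (pvS l k ≠ pvS l (k + 1)))) := by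
  have hd : (PySem.List.pyRange 0 ((l.length : Int) - 1) 1).map
      (fun i => |PySem.List.pyGetD l i 0 - PySem.List.pyGetD l (i + 1) 0|)
      = (List.range (l.length - 1)).map (fun k => pvD l k) := by
    rw [PySem.List.pyRange_one, List.map_map]
    rw [show ((l.length : Int) - 1 - 0).toNat = l.length - 1 from by omega]
    apply List.map_congr_left
    intro k _
    simp only [Function.comp_apply, zero_add]
    rw [show ((k : Int) + 1) = ((k + 1 : Nat) : Int) from by push_cast; ring,
        PySem.List.pyGetD_natCast, PySem.List.pyGetD_natCast]
    rfl
  simp only [accordian_alt]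
  rw [hd]
  simp only [List.length_map, List.length_range]
  have hs : (PySem.List.pyRange 0 (((l.length - 1 : Nat) : Int) - 1) 1).map
      (fun i => (if PySem.List.pyGetD ((List.range (l.length - 1)).map (fun k => pvD l k)) (i + 1) 0
                    > PySem.List.pyGetD ((List.range (l.length - 1)).map (fun k => pvD l k)) i 0 then (1 : Int) else 0)
              - (if PySem.List.pyGetD ((List.range (l.length - 1)).map (fun k => pvD l k)) (i + 1) 0
                    < PySem.List.pyGetD ((List.range (l.length - 1)).map (fun k => pvD l k)) i 0 then (1 : Int) else 0))
      = (List.range (l.length - 2)).map (fun k => pvS l k) := by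
    rw [PySem.List.pyRange_one, List.map_map]
    rw [show (((l.length - 1 : Nat) : Int) - 1 - 0).toNat = l.length - 2 from by omega]
    apply List.map_congr_left
    intro k hk
    rw [List.mem_range] at hk
    simp only [Function.comp_apply, zero_add]
    rw [show ((k : Int) + 1) = ((k + 1 : Nat) : Int) from by push_cast; ring,
        PySem.List.pyGetD_natCast, PySem.List.pyGetD_natCast,
        PySem.List.getD_map_range _ _ _ _ (by omega), PySem.List.getD_map_range _ _ _ _ (by omega)]
    rfl
  rw [hs]
  rw [show (((PySem.List.pyRange 0 (((l.length - 1 : Nat) : Int) - 1) 1).length : Int) - 1)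
      = ((l.length - 3 : Nat) : Int) from by rw [PySem.List.length_pyRange_one]; omega]
  by_cases hc : (List.map (fun k => pvS l k) (List.range (l.length - 2))).contains 0
  · rw [if_pos hc]
    rw [List.contains_iff_mem] at hc
    simp only [List.mem_map, List.mem_range] at hc
    obtain ⟨k, hk, hk0⟩ := hc
    have h1 : (List.range (l.length - 2)).all (fun j => decide (pvS l j ≠ 0)) = false := by
      rw [List.all_eq_false]
      exact ⟨k, List.mem_range.mpr hk, by simp [hk0]⟩
    rw [h1, Bool.false_and]
  · rw [if_neg hc]
    have hc' : ∀ j < l.length - 2, pvS l j ≠ 0 := by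
      intro j hj hj0
      exact hc (List.contains_iff_mem.mpr (List.mem_map.mpr ⟨j, List.mem_range.mpr hj, hj0⟩))
    have h1 : (List.range (l.length - 2)).all (fun j => decide (pvS l j ≠ 0)) = true := by
      simp only [List.all_eq_true, List.mem_range, decide_eq_true_iff]
      exact hc'
    rw [h1, Bool.true_and]
    rw [PySem.List.pyRange_one,
        show (((l.length - 3 : Nat) : Int) - 0).toNat = l.length - 3 from by omega, List.all_map]
    rw [Bool.eq_iff_iff]
    simp only [List.all_eq_true, List.mem_range, Function.comp_apply, zero_add]
    constructor
    · intro hall k hk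
      have := hall k hk
      rw [PySem.List.pyGetD_natCast,
          show ((k : Int) + 1) = ((k + 1 : Nat) : Int) from by push_cast; ring,
          PySem.List.pyGetD_natCast,
          PySem.List.getD_map_range _ _ _ _ (by omega),
          PySem.List.getD_map_range _ _ _ _ (by omega)] at this
      simpa using this
    · intro hall k hk
      have := hall k hk
      rw [PySem.List.pyGetD_natCast,
          show ((k : Int) + 1) = ((k + 1 : Nat) : Int) from by push_cast; ring,
          PySem.List.pyGetD_natCast,
          PySem.List.getD_map_range _ _ _ _ (by omega),
          PySem.List.getD_map_range _ _ _ _ (by omega)]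
      simpa using this

-- ===== VERDICT (by name: the statement is the Claim_ definition above) =====
theorem accordian_spec : Claim_equal_accordian := by
  intro l _ hpre
  unfold Spec_accordian
  rw [pvAchar l hpre, pvBchar l hpre, Bool.eq_iff_iff]
  simp only [Bool.and_eq_true, List.all_eq_true, List.mem_range, decide_eq_true_iff]
  have hn := hpre
  unfold Pre_accordian at hn
  constructor
  · rintro ⟨h0, hrest⟩
    refine ⟨?_, ?_⟩
    · intro j hj
      cases j with
      | zero => exact h0
      | succ k =>
        have := (hrest k (by omega)).1
        rwa [Nat.add_comm] at this
    · intro k hk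
      intro he
      apply (hrest k (by omega)).2
      rw [Nat.add_comm]
      exact he.symm
  · rintro ⟨hall, halt⟩
    refine ⟨hall 0 (by omega), ?_⟩
    intro k hk
    refine ⟨by rw [Nat.add_comm]; exact hall (k + 1) (by omega), ?_⟩
    intro he
    apply halt k (by omega)
    rw [Nat.add_comm] at he
    exact he.symm
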